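-- pv_equiv track=rewrite | github.com/zontafil/advection-conservation | triangular_mesh.py | checkRegionsHaveCommonEdge
-- ===== SOURCE A (Python) =====
-- def checkRegionsHaveCommonEdge(a, b):
--     """Check if two regions have at least one common edge
--
--     Arguments:
--         a {list} -- region A object
--         b {list} -- region B object
--
--     Returns:
--         True/False
--     """
--     ret = False
--     for i in a:
--         if i == -1:
--             continue
--         for j in b:
--             if j == -1:
--                 continue
--             if i == j:
--                 ret = True
--     return ret
-- ===== SOURCE B (Python) =====
-- def checkRegionsHaveCommonEdge(a, b):
--     """Check if two regions have at least one common edge (set intersection, sentinel -1 ignored)."""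
--     return bool((set(a) & set(b)) - {-1})
-- ===== Notes on version B (the rewrite author's own statement) =====
-- stated objective: simpler
-- what changed: Replaces the nested double loop with a flag by a one-line set intersection minus the -1 sentinel, coerced to bool.
import Mathlib
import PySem

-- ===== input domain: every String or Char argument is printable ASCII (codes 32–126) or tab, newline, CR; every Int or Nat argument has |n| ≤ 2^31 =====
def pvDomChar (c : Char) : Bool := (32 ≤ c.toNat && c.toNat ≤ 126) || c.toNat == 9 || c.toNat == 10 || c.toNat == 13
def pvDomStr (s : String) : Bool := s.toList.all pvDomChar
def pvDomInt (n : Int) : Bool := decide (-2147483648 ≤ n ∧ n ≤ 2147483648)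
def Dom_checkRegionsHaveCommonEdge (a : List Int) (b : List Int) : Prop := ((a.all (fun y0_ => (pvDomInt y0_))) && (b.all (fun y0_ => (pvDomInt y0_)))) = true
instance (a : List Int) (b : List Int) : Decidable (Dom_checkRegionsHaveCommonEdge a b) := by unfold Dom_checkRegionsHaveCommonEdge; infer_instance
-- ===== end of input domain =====

-- ===== PORT A =====
-- Port of A: nested loop over a then b, skipping -1, flag set on a match.
def checkRegionsHaveCommonEdge (a : List Int) (b : List Int) : Bool :=
  a.foldl (fun ret i =>
    if i = -1 then ret
    else b.foldl (fun ret j =>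
      if j = -1 then ret
      else if i = j then true
      else ret) ret) false

-- ===== PORT B =====
-- Port of B: bool((set(a) & set(b)) - {-1})  — set intersection minus the -1 sentinel.
def checkRegionsHaveCommonEdge_alt (a : List Int) (b : List Int) : Bool :=
  !((PySem.Set.diff (PySem.Set.inter (PySem.Set.ofList a) (PySem.Set.ofList b))
      (PySem.Set.ofList [-1])).isEmpty)

-- ===== PRECONDITION & SPEC =====
def Spec_checkRegionsHaveCommonEdge (a : List Int) (b : List Int) (out : Bool) : Prop := out = checkRegionsHaveCommonEdge_alt a b
instance (a : List Int) (b : List Int) (out : Bool) : Decidable (Spec_checkRegionsHaveCommonEdge a b out) := by unfold Spec_checkRegionsHaveCommonEdge; infer_instance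

-- ===== CLAIM (what is proved, stated in full; the proofs are below) =====
def Claim_equal_checkRegionsHaveCommonEdge : Prop := ∀ (a : List Int) (b : List Int), Dom_checkRegionsHaveCommonEdge a b → Spec_checkRegionsHaveCommonEdge a b (checkRegionsHaveCommonEdge a b)

-- ===== LEMMAS AND PROOFS =====

-- inner loop over b: the flag fold equals flag-or-existence
theorem pvInner (i : Int) (b : List Int) : ∀ r : Bool,
    b.foldl (fun ret j => if j = -1 then ret else if i = j then true else ret) r
      = (r || b.any (fun j => decide (j ≠ -1) && decide (i = j))) := by
  induction b with
  | nil => intro r; simp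
  | cons x xs ih =>
    intro r
    simp only [List.foldl_cons, List.any_cons]
    by_cases hx : x = -1
    · rw [if_pos hx, ih]; simp [hx]
    · rw [if_neg hx]
      by_cases hij : i = x
      · rw [if_pos hij, ih]; simp [hx, hij]
      · rw [if_neg hij, ih]; simp [hij]

-- outer loop over a
theorem pvOuter (a b : List Int) : ∀ r : Bool,
    a.foldl (fun ret i =>
      if i = -1 then ret
      else b.foldl (fun ret j => if j = -1 then ret else if i = j then true else ret) ret) r
      = (r || a.any (fun i => decide (i ≠ -1) && b.any (fun j => decide (j ≠ -1) && decide (i = j)))) := by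
  induction a with
  | nil => intro r; simp
  | cons x xs ih =>
    intro r
    simp only [List.foldl_cons, List.any_cons]
    by_cases hx : x = -1
    · rw [if_pos hx, ih]; simp [hx]
    · rw [if_neg hx, pvInner, ih]
      simp [hx, Bool.or_assoc]

-- ===== VERDICT (by name: the statement is the Claim_ definition above) =====
theorem checkRegionsHaveCommonEdge_spec : Claim_equal_checkRegionsHaveCommonEdge := by
  intro a b _
  unfold Spec_checkRegionsHaveCommonEdge checkRegionsHaveCommonEdge checkRegionsHaveCommonEdge_alt
  rw [pvOuter]
  rcases h : (PySem.Set.diff (PySem.Set.inter (PySem.Set.ofList a) (PySem.Set.ofList b))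
      (PySem.Set.ofList [-1])).isEmpty with _ | _
  · -- RHS set nonempty: some x ∈ a, x ∈ b, x ≠ -1
    rw [List.isEmpty_eq_false_iff_exists_mem] at h
    obtain ⟨x, hx⟩ := h
    rw [PySem.Set.mem_diff, PySem.Set.mem_inter, PySem.Set.mem_ofList, PySem.Set.mem_ofList,
      PySem.Set.mem_ofList] at hx
    have hne : x ≠ -1 := by simpa using hx.2
    simp only [Bool.false_or, Bool.not_false]
    rw [List.any_eq_true]
    refine ⟨x, hx.1.1, ?_⟩
    simp only [Bool.and_eq_true, decide_eq_true_eq]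
    exact ⟨hne, List.any_eq_true.mpr ⟨x, hx.1.2, by simp [hne]⟩⟩
  · -- RHS set empty: no common non-sentinel element
    simp only [List.isEmpty_iff] at h
    simp only [Bool.false_or, Bool.not_true]
    rw [List.any_eq_false]
    intro i hi
    simp only [Bool.and_eq_true, not_and, decide_eq_true_eq]
    intro hne hany
    rw [List.any_eq_true] at hany
    obtain ⟨j, hj, hij⟩ := hany
    simp only [Bool.and_eq_true, decide_eq_true_eq] at hij
    have hmem : i ∈ PySem.Set.diff (PySem.Set.inter (PySem.Set.ofList a) (PySem.Set.ofList b))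
        (PySem.Set.ofList [-1]) := by
      rw [PySem.Set.mem_diff, PySem.Set.mem_inter, PySem.Set.mem_ofList, PySem.Set.mem_ofList,
        PySem.Set.mem_ofList]
      exact ⟨⟨hi, hij.2 ▸ hj⟩, by simpa using hne⟩
    rw [h] at hmem
    exact absurd hmem (List.not_mem_nil)
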